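-- pv_equiv track=rewrite | github.com/boyland-pf/MARS-Dataset | convert_script.py | replace_whitespace
-- ===== SOURCE A (Python) =====
-- def replace_whitespace(s):
-- 	res = []
-- 	prevwhite = True
-- 	for c in s:
-- 		if c in ["#"]:
-- 			continue
-- 		if c in [' ','\t']:
-- 			if not prevwhite:
-- 				prevwhite = True
-- 				res.append(' ')
-- 		else:
-- 			prevwhite = False
-- 			res.append(c)
-- 	return "".join(res)
-- ===== SOURCE B (Python) =====
-- def replace_whitespace(s):
--     t = ''.join(' ' if c in ' \t' else c for c in s if c != '#')
--     return ''.join(c for prev, c in zip(' ' + t, t) if not (c == ' ' and prev == ' '))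
-- ===== Notes on version B (the rewrite author's own statement) =====
-- stated objective: simpler
-- what changed: Replaces the stateful char-by-char scan (prevwhite flag plus append loop) with two declarative passes: a comprehension that drops hash characters and normalizes tabs to spaces, then a filter of the string zipped with a space-prefixed shifted copy of itself, which handles both run-collapsing and the leading strip.
import Mathlib
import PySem

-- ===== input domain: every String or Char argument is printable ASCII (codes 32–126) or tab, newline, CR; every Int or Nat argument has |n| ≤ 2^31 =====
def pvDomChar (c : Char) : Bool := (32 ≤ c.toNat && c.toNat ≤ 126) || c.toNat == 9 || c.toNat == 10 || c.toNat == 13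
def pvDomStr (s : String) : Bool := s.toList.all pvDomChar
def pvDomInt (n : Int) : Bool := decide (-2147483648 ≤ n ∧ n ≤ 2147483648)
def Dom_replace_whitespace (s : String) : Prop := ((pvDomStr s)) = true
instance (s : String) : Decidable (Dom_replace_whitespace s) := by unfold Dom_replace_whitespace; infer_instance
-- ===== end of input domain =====

-- B replaces A's stateful scan with two declarative passes (normalize, then zip-with-shifted-self filter); objective: simpler.

-- ===== PORT A =====
-- the for-loop of A: state = accumulated res and the prevwhite flag
def rwLoopA : List Char → List Char → Bool → List Char
  | [], res, _ => res
  | c :: cs, res, prevwhite =>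
    if c = '#' then rwLoopA cs res prevwhite
    else if c = ' ' ∨ c = '\t' then
      if ¬ prevwhite then rwLoopA cs (res ++ [' ']) true
      else rwLoopA cs res true
    else rwLoopA cs (res ++ [c]) false

def replace_whitespace (s : String) : String :=
  String.mk (rwLoopA s.toList [] true)

-- ===== PORT B =====
-- t = ''.join(' ' if c in ' \t' else c for c in s if c != '#')
def rwNorm (l : List Char) : List Char :=
  (l.filter (fun c => c ≠ '#')).map (fun c => if c = ' ' ∨ c = '\t' then ' ' else c)

def replace_whitespace_alt (s : String) : String :=
  let t := rwNorm s.toList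
  String.mk ((((' ' :: t).zip t).filter (fun pc => ¬ (pc.2 = ' ' ∧ pc.1 = ' '))).map Prod.snd)

-- ===== PRECONDITION & SPEC =====
def Spec_replace_whitespace (s : String) (out : String) : Prop := out = replace_whitespace_alt s
instance (s : String) (out : String) : Decidable (Spec_replace_whitespace s out) := by unfold Spec_replace_whitespace; infer_instance

-- ===== CLAIM (what is proved, stated in full; the proofs are below) =====
def Claim_equal_replace_whitespace : Prop := ∀ (s : String), Dom_replace_whitespace s → Spec_replace_whitespace s (replace_whitespace s)

-- ===== LEMMAS AND PROOFS =====

-- B's zip-filter core, as a recursion on (previous char, rest)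
def rwGo (prev : Char) : List Char → List Char
  | [] => []
  | c :: cs => if c = ' ' ∧ prev = ' ' then rwGo c cs else c :: rwGo c cs

lemma rwZip_eq_go (prev : Char) (t : List Char) :
    ((((prev :: t).zip t).filter (fun pc => ¬ (pc.2 = ' ' ∧ pc.1 = ' '))).map Prod.snd)
      = rwGo prev t := by
  induction t generalizing prev with
  | nil => simp [rwGo]
  | cons c cs ih =>
    simp only [List.zip_cons_cons, List.filter_cons]
    by_cases h : c = ' ' ∧ prev = ' '
    · rw [if_neg (by simp [h.1, h.2]), rwGo, if_pos h, ih]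
    · rw [if_pos (by simp only [decide_eq_true_eq]; simpa [not_and] using h), List.map_cons, ih, rwGo, if_neg h]

lemma rwLoopA_eq (cs : List Char) : ∀ (res : List Char) (prev : Char),
    rwLoopA cs res (decide (prev = ' ')) = res ++ rwGo prev (rwNorm cs) := by
  induction cs with
  | nil => intro res prev; simp [rwLoopA, rwNorm, rwGo]
  | cons c cs ih =>
    intro res prev
    by_cases hhash : c = '#'
    · have hn : rwNorm (c :: cs) = rwNorm cs := by simp [rwNorm, hhash]
      simp only [rwLoopA, if_pos hhash, hn, ih]
    · by_cases hsp : c = ' ' ∨ c = '\t'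
      · have hn : rwNorm (c :: cs) = ' ' :: rwNorm cs := by
          simp [rwNorm, hhash, hsp]
        have h1 : rwLoopA cs res true = res ++ rwGo ' ' (rwNorm cs) := by
          simpa using ih res ' '
        have h2 : rwLoopA cs (res ++ [' ']) true = (res ++ [' ']) ++ rwGo ' ' (rwNorm cs) := by
          simpa using ih (res ++ [' ']) ' '
        by_cases hp : prev = ' '
        · simp [rwLoopA, hhash, hsp, hp, hn, rwGo, h1]
        · simp [rwLoopA, hhash, hsp, hp, hn, rwGo, h2]
      · have hc : c ≠ ' ' := fun h => hsp (Or.inl h)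
        have ht : c ≠ '\t' := fun h => hsp (Or.inr h)
        have hn : rwNorm (c :: cs) = c :: rwNorm cs := by
          simp [rwNorm, hhash, hsp]
        have h3 : rwLoopA cs (res ++ [c]) false = (res ++ [c]) ++ rwGo c (rwNorm cs) := by
          have := ih (res ++ [c]) c
          rwa [decide_eq_false hc] at this
        simp [rwLoopA, hhash, hc, ht, hn, rwGo, h3]

-- ===== VERDICT (by name: the statement is the Claim_ definition above) =====
theorem replace_whitespace_spec : Claim_equal_replace_whitespace := by
  intro s _
  unfold Spec_replace_whitespace replace_whitespace replace_whitespace_alt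
  simp only [rwZip_eq_go]
  have h : rwLoopA s.toList [] true = rwGo ' ' (rwNorm s.toList) := by
    simpa using rwLoopA_eq s.toList [] ' '
  rw [h]
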